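-- pv_equiv track=rewrite | github.com/james-menzies/nudge | src/display_utils.py | render_columns
-- ===== SOURCE A (Python) =====
-- def render_columns(columns, col_width=30):
--     max_rows = 0
--
--     result = ""
--
--     for index, column in enumerate(columns):
--
--         column = str(column)
--         column = column.split(sep="\n")
--
--         columns[index] = column
--         if len(column) > max_rows:
--             max_rows = len(column)
--
--     for i in range(0, max_rows):
--         for column in columns:
--             if i >= len(column):
--                 line_str = ""
--             else:
--                 line_str = column[i]
--
--             result += "{0:<{width}}".format(line_str, width=col_width)
--         result += "\n"
--
--     return result
-- ===== SOURCE B (Python) =====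
-- def render_columns(columns, col_width=30):
--     # column-major construction: collect each output row's cells while walking the columns once
--     for i, c in enumerate(columns):
--         columns[i] = str(c).split("\n")
--     rows = max((len(col) for col in columns), default=0)
--     lines = [[] for _ in range(rows)]
--     for col in columns:
--         padded = col + [""] * (rows - len(col))
--         for i, cell in enumerate(padded):
--             lines[i].append(cell.ljust(col_width))
--     return "".join("".join(line) + "\n" for line in lines)
-- ===== Notes on version B (the rewrite author's own statement) =====
-- stated objective: alternative
-- what changed: A fills the grid row-major with nested loops over range(max_rows) and repeated indexing into every column; B builds all row strings column-major in one walk over the columns (padding each column and appending its ljust-ed cells to the accumulated lines), then joins the lines.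
-- outside the precondition, e.g. on render_columns(['a'], -1): A raises ValueError, B returns 'a\n'
import Mathlib
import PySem

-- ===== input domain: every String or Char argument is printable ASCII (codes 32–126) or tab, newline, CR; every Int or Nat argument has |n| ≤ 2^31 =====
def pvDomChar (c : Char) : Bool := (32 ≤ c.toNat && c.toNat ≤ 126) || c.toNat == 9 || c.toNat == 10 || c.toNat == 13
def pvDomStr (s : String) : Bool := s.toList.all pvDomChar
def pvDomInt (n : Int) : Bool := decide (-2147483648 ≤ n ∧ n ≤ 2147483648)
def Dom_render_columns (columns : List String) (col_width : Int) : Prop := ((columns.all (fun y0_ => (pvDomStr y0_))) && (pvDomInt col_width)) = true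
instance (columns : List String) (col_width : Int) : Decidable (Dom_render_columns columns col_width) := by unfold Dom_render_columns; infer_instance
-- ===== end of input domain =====

-- B builds the grid column-major (accumulating every output row while walking the columns once)
-- instead of A's row-major nested loops; objective: alternative decomposition, same cost.
-- In Python both A and B mutate the `columns` argument in place (each entry replaced by its list
-- of lines); the equivalence proved here is about the RETURN value.

-- ===== PORT A =====
-- '{0:<{width}}'.format(s, width=w): exact for w ≥ 0 (Pre_ excludes negative widths, where Python raises ValueError)
def padFmt (s : List Char) (w : Int) : List Char := s ++ List.replicate (w - s.length).toNat ' '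

def render_columns (columns : List String) (col_width : Int) : String :=
  -- first loop: split every column (str.split("\n")), tracking max_rows
  let st := columns.foldl
    (fun (acc : List (List (List Char)) × Int) column =>
      let col := PySem.Chars.splitOn column.toList ['\n']
      (acc.1 ++ [col], if (col.length : Int) > acc.2 then (col.length : Int) else acc.2))
    ([], 0)
  -- second loop: row-major accumulation of result
  let result := (PySem.List.pyRange 0 st.2 1).foldl
    (fun result i =>
      (st.1.foldl
        (fun result column =>
          let line_str := if i ≥ (column.length : Int) then [] else PySem.List.pyGetD column i []
          result ++ padFmt line_str col_width)
        result) ++ ['\n'])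
    []
  String.ofList result

-- ===== PORT B =====
-- cell.ljust(col_width) (exact: negative or small width returns the string unchanged)
def ljustChars (s : List Char) (w : Int) : List Char := s ++ List.replicate (w - s.length).toNat ' '

def render_columns_alt (columns : List String) (col_width : Int) : String :=
  let split := columns.map (fun c => PySem.Chars.splitOn c.toList ['\n'])
  let rows := split.foldl (fun m col => Nat.max m col.length) 0
  let lines := split.foldl
    (fun lines col =>
      ((col ++ List.replicate (rows - col.length) ([] : List Char)).zipIdx).foldl
        (fun ls p => ls.set p.2 (ls.getD p.2 [] ++ [ljustChars p.1 col_width]))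
        lines)
    (List.replicate rows ([] : List (List Char)))
  String.ofList (lines.foldl (fun acc line => acc ++ line.flatten ++ ['\n']) [])

-- ===== PRECONDITION & SPEC =====
-- Pre_ excludes only the inputs on which Python A raises: with a nonempty columns list and a
-- negative col_width the format spec '{0:<{width}}' gets a negative width and raises ValueError.
def Pre_render_columns (columns : List String) (col_width : Int) : Prop :=
  columns = [] ∨ 0 ≤ col_width
instance (columns : List String) (col_width : Int) : Decidable (Pre_render_columns columns col_width) := by
  unfold Pre_render_columns; infer_instance

def pvWitness_render_columns : List String × Int := (["ab\nc", "xyz"], 5)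

def Spec_render_columns (columns : List String) (col_width : Int) (out : String) : Prop := out = render_columns_alt columns col_width
instance (columns : List String) (col_width : Int) (out : String) : Decidable (Spec_render_columns columns col_width out) := by unfold Spec_render_columns; infer_instance

-- ===== CLAIM (what is proved, stated in full; the proofs are below) =====
def Claim_equal_render_columns : Prop := ∀ (columns : List String) (col_width : Int), Dom_render_columns columns col_width → Pre_render_columns columns col_width → Spec_render_columns columns col_width (render_columns columns col_width)

-- ===== LEMMAS AND PROOFS =====

-- the split columns, the row count, the padded cell of a column at a row, a row, the whole grid
def pvSplit (columns : List String) : List (List (List Char)) :=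
  columns.map (fun c => PySem.Chars.splitOn c.toList ['\n'])

def pvRows (cs : List (List (List Char))) (m : Nat) : Nat :=
  cs.foldl (fun m col => Nat.max m col.length) m

def pvCell (w : Int) (col : List (List Char)) (i : Nat) : List Char :=
  padFmt (if i < col.length then col.getD i [] else []) w

def pvRow (w : Int) (cs : List (List (List Char))) (i : Nat) : List Char :=
  cs.flatMap (fun col => pvCell w col i)

def pvRowFrags (w : Int) (cs : List (List (List Char))) (i : Nat) : List (List Char) :=
  cs.map (fun col => pvCell w col i)

def pvGrid (w : Int) (cs : List (List (List Char))) (rows : Nat) : List Char :=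
  (List.range rows).flatMap (fun i => pvRow w cs i ++ ['\n'])

-- ---- A-side lemmas ----

theorem pvStFold (cols : List String) (acc : List (List (List Char))) (m : Nat) :
    cols.foldl
      (fun (acc : List (List (List Char)) × Int) column =>
        let col := PySem.Chars.splitOn column.toList ['\n']
        (acc.1 ++ [col], if (col.length : Int) > acc.2 then (col.length : Int) else acc.2))
      (acc, (m : Int))
    = (acc ++ pvSplit cols, (pvRows (pvSplit cols) m : Int)) := by
  induction cols generalizing acc m with
  | nil => simp [pvSplit, pvRows]
  | cons c cols ih =>
    simp only [List.foldl_cons]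
    have h : (if ((PySem.Chars.splitOn c.toList ['\n']).length : Int) > (m : Int)
        then ((PySem.Chars.splitOn c.toList ['\n']).length : Int) else (m : Int))
        = ((Nat.max m (PySem.Chars.splitOn c.toList ['\n']).length : Nat) : Int) := by
      split_ifs with h <;> push_cast <;> omega
    rw [h, ih]
    simp [pvSplit, pvRows, List.append_assoc]

theorem pvInnerRowFold (w : Int) (cs : List (List (List Char))) (res : List Char) (k : Nat) :
    cs.foldl
      (fun res col =>
        let line_str := if ((k : Int)) ≥ (col.length : Int) then [] else PySem.List.pyGetD col ((k : Int)) []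
        res ++ padFmt line_str w)
      res
    = res ++ pvRow w cs k := by
  have hbody : ∀ col : List (List Char),
      (if ((k : Int)) ≥ (col.length : Int) then [] else PySem.List.pyGetD col ((k : Int)) [])
        = (if k < col.length then col.getD k [] else []) := by
    intro col
    by_cases h : k < col.length
    · rw [if_neg (by exact_mod_cast not_le.mpr (by exact_mod_cast h)), if_pos h,
        PySem.List.pyGetD_natCast]
    · rw [if_pos (by exact_mod_cast not_lt.mp h), if_neg h]
  simp only [hbody]
  rw [PySem.List.foldl_append_eq_flatMap (fun col => padFmt (if k < col.length then col.getD k [] else []) w) cs res]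
  rfl

theorem pvAEq (columns : List String) (w : Int) :
    render_columns columns w
      = String.ofList (pvGrid w (pvSplit columns) (pvRows (pvSplit columns) 0)) := by
  simp only [render_columns]
  rw [show (([] : List (List (List Char))), (0 : Int)) = (([] : List (List (List Char))), ((0 : Nat) : Int)) by norm_num,
    pvStFold columns [] 0]
  simp only [List.nil_append]
  rw [PySem.List.pyRange_one]
  rw [List.foldl_map]
  simp only [zero_add, Int.sub_zero, Int.toNat_natCast]
  have hstep : ∀ (res : List Char) (k : Nat),
      ((pvSplit columns).foldl
        (fun res col =>
          let line_str := if ((k : Int)) ≥ (col.length : Int) then [] else PySem.List.pyGetD col ((k : Int)) []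
          res ++ padFmt line_str w)
        res) ++ ['\n'] = res ++ (pvRow w (pvSplit columns) k ++ ['\n']) := by
    intro res k
    rw [pvInnerRowFold, List.append_assoc]
  simp only [hstep]
  rw [PySem.List.foldl_append_eq_flatMap (fun k => pvRow w (pvSplit columns) k ++ ['\n'])]
  rfl

-- ---- B-side lemmas ----

theorem pvRows_le (cs : List (List (List Char))) (m : Nat) : m ≤ pvRows cs m := by
  induction cs generalizing m with
  | nil => simp [pvRows]
  | cons c cs ih =>
    have h1 := ih (Nat.max m c.length)
    simp only [pvRows, List.foldl_cons] at h1 ⊢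
    exact le_trans (Nat.le_max_left _ _) h1

theorem pvRows_mem_le (cs : List (List (List Char))) (m : Nat) (col : List (List Char))
    (h : col ∈ cs) : col.length ≤ pvRows cs m := by
  induction cs generalizing m with
  | nil => simp at h
  | cons c cs ih =>
    rcases List.mem_cons.mp h with rfl | h
    · have h1 := pvRows_le cs (Nat.max m col.length)
      simp only [pvRows, List.foldl_cons] at h1 ⊢
      exact le_trans (Nat.le_max_right _ _) h1
    · simpa only [pvRows, List.foldl_cons] using ih (Nat.max m c.length) h

theorem pvSetFold_length {α γ : Type} (g : α → List γ) (padded : List α) (s : Nat)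
    (ls : List (List γ)) :
    ((padded.zipIdx s).foldl
      (fun ls (p : α × Nat) => ls.set p.2 (ls.getD p.2 [] ++ g p.1)) ls).length
    = ls.length := by
  induction padded generalizing s ls with
  | nil => rfl
  | cons a padded ih =>
    rw [List.zipIdx_cons, List.foldl_cons, ih]
    simp

theorem pvSetFold_getD {α γ : Type} (g : α → List γ) (d : α) (padded : List α) (s : Nat)
    (ls : List (List γ)) (h : s + padded.length ≤ ls.length) (i : Nat) :
    ((padded.zipIdx s).foldl
      (fun ls (p : α × Nat) => ls.set p.2 (ls.getD p.2 [] ++ g p.1)) ls).getD i []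
    = if s ≤ i ∧ i < s + padded.length
        then ls.getD i [] ++ g (padded.getD (i - s) d)
        else ls.getD i [] := by
  induction padded generalizing s ls with
  | nil => simp
  | cons a padded ih =>
    rw [List.zipIdx_cons, List.foldl_cons]
    have hlc : (a :: padded).length = padded.length + 1 := by simp
    have hs : s < ls.length := by omega
    set ls' := ls.set s (ls.getD s [] ++ g a) with hls'
    have hlen' : ls'.length = ls.length := by simp [hls']
    have h' : (s + 1) + padded.length ≤ ls'.length := by omega
    rw [ih (s + 1) ls' h']
    by_cases h1 : s + 1 ≤ i ∧ i < s + 1 + padded.length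
    · rw [if_pos h1, if_pos (by constructor <;> omega)]
      have hgd : ls'.getD i [] = ls.getD i [] := by
        rw [hls', List.getD_eq_getElem?_getD, List.getElem?_set_ne (by omega),
          ← List.getD_eq_getElem?_getD]
      rw [hgd, show i - s = (i - (s + 1)) + 1 by omega, List.getD_cons_succ]
    · by_cases h2 : i = s
      · subst h2
        rw [if_neg h1, if_pos (by constructor <;> omega)]
        have hgd : ls'.getD i [] = ls.getD i [] ++ g a := by
          rw [hls', List.getD_eq_getElem?_getD, List.getElem?_set_self (by omega), Option.getD_some]
        rw [hgd, Nat.sub_self, List.getD_cons_zero]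
      · rw [if_neg h1, if_neg (by rw [hlc]; omega)]
        rw [hls', List.getD_eq_getElem?_getD, List.getElem?_set_ne (by omega),
          ← List.getD_eq_getElem?_getD]

theorem pvColFold_length (w : Int) (rows : Nat) (cs : List (List (List Char)))
    (ls : List (List (List Char))) :
    (cs.foldl
      (fun lines col =>
        ((col ++ List.replicate (rows - col.length) ([] : List Char)).zipIdx).foldl
          (fun ls (p : List Char × Nat) => ls.set p.2 (ls.getD p.2 [] ++ [ljustChars p.1 w])) lines)
      ls).length = ls.length := by
  induction cs generalizing ls with
  | nil => rfl
  | cons c cs ih =>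
    rw [List.foldl_cons, ih, pvSetFold_length (fun cell => [ljustChars cell w])]

theorem pvColFold_getD (w : Int) (rows : Nat) (cs : List (List (List Char)))
    (ls : List (List (List Char)))
    (hlen : ls.length = rows) (hcols : ∀ col ∈ cs, col.length ≤ rows) (i : Nat) (hi : i < rows) :
    (cs.foldl
      (fun lines col =>
        ((col ++ List.replicate (rows - col.length) ([] : List Char)).zipIdx).foldl
          (fun ls (p : List Char × Nat) => ls.set p.2 (ls.getD p.2 [] ++ [ljustChars p.1 w])) lines)
      ls).getD i []
    = ls.getD i [] ++ pvRowFrags w cs i := by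
  induction cs generalizing ls with
  | nil => simp [pvRowFrags]
  | cons c cs ih =>
    have hc : c.length ≤ rows := hcols c (by simp)
    have hpadlen : (c ++ List.replicate (rows - c.length) ([] : List Char)).length = rows := by
      simp; omega
    rw [List.foldl_cons]
    rw [ih _ (by rw [pvSetFold_length (fun cell => [ljustChars cell w])]; exact hlen) (fun col h => hcols col (by simp [h]))]
    rw [pvSetFold_getD (fun cell => [ljustChars cell w]) ([] : List Char) _ 0 ls (by omega) i,
      if_pos ⟨Nat.zero_le _, by omega⟩]
    have hcell : (c ++ List.replicate (rows - c.length) ([] : List Char)).getD (i - 0) []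
        = (if i < c.length then c.getD i [] else []) := by
      simp only [Nat.sub_zero]
      by_cases hlt : i < c.length
      · rw [if_pos hlt, List.getD_eq_getElem?_getD, List.getElem?_append_left hlt,
          ← List.getD_eq_getElem?_getD]
      · rw [if_neg hlt, List.getD_eq_getElem?_getD,
          List.getElem?_append_right (by omega)]
        rw [List.getElem?_replicate]
        split <;> simp
    rw [hcell]
    rw [show ljustChars (if i < c.length then c.getD i [] else []) w = pvCell w c i from rfl]
    simp [pvRowFrags, List.append_assoc]

theorem pvLinesEq (w : Int) (rows : Nat) (cs : List (List (List Char)))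
    (hcols : ∀ col ∈ cs, col.length ≤ rows) :
    (cs.foldl
      (fun lines col =>
        ((col ++ List.replicate (rows - col.length) ([] : List Char)).zipIdx).foldl
          (fun ls (p : List Char × Nat) => ls.set p.2 (ls.getD p.2 [] ++ [ljustChars p.1 w])) lines)
      (List.replicate rows ([] : List (List Char))))
    = (List.range rows).map (fun i => pvRowFrags w cs i) := by
  apply List.ext_getElem
  · rw [pvColFold_length]; simp
  · intro i h1 h2
    have hi : i < rows := by simpa using h2
    have := pvColFold_getD w rows cs (List.replicate rows ([] : List (List Char))) (by simp) hcols i hi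
    rw [List.getD_eq_getElem?_getD, List.getElem?_eq_getElem h1, Option.getD_some] at this
    rw [this]
    simp [hi]

theorem pvBEq (columns : List String) (w : Int) :
    render_columns_alt columns w
      = String.ofList (pvGrid w (pvSplit columns) (pvRows (pvSplit columns) 0)) := by
  simp only [render_columns_alt]
  rw [show (columns.map (fun c => PySem.Chars.splitOn c.toList ['\n'])) = pvSplit columns from rfl]
  rw [show ((pvSplit columns).foldl (fun m col => Nat.max m col.length) 0) = pvRows (pvSplit columns) 0 from rfl]
  rw [pvLinesEq w (pvRows (pvSplit columns) 0) (pvSplit columns)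
      (fun col h => pvRows_mem_le (pvSplit columns) 0 col h)]
  rw [List.foldl_map]
  have hstep : ∀ (acc : List Char) (k : Nat),
      acc ++ (pvRowFrags w (pvSplit columns) k).flatten ++ ['\n']
        = acc ++ (pvRow w (pvSplit columns) k ++ ['\n']) := by
    intro acc k
    rw [show (pvRowFrags w (pvSplit columns) k).flatten = pvRow w (pvSplit columns) k by
      simp [pvRowFrags, pvRow, List.flatMap_def], List.append_assoc]
  simp only [hstep]
  rw [PySem.List.foldl_append_eq_flatMap (fun k => pvRow w (pvSplit columns) k ++ ['\n'])]
  rfl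

-- ===== VERDICT (by name: the statement is the Claim_ definition above) =====
theorem render_columns_spec : Claim_equal_render_columns := by
  intro columns col_width _ _
  unfold Spec_render_columns
  rw [pvAEq, pvBEq]
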